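-- pv_equiv track=rewrite | github.com/vdeb27/woningzoeker | backend/collectors/ov_collector.py | _determine_stop_type
-- ===== SOURCE A (Python) =====
-- from typing import Any, Dict, List, Optional
--
-- def _determine_stop_type(stop_info: Dict, lines: List[str]) -> str:
--     """Determine the primary transport type at a stop."""
--     # Check from line names first
--     has_trein = any("Trein" in l or "Intercity" in l or "Sprinter" in l for l in lines)
--     has_metro = any("Metro" in l for l in lines)
--     has_tram = any("Tram" in l for l in lines)
--
--     if has_trein:
--         return "trein"
--     if has_metro:
--         return "metro"
--     if has_tram:
--         return "tram"
--     return "bus"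
-- ===== SOURCE B (Python) =====
-- def _line_rank(l):
--     """Priority rank of a single line: 0=trein, 1=metro, 2=tram, 3=bus."""
--     if "Trein" in l or "Intercity" in l or "Sprinter" in l:
--         return 0
--     if "Metro" in l:
--         return 1
--     if "Tram" in l:
--         return 2
--     return 3
--
--
-- def _determine_stop_type(stop_info, lines):
--     """Determine the primary transport type at a stop.
--
--     Classify every line to a priority rank and return the name of the best
--     (smallest) rank found, 'bus' when there are no lines.
--     """
--     names = ("trein", "metro", "tram", "bus")
--     return names[min(map(_line_rank, lines), default=3)]
-- ===== Notes on version B (the rewrite author's own statement) =====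
-- stated objective: alternative
-- what changed: Instead of three whole-list any() scans combined by an if-cascade, B classifies each line independently to a numeric priority rank (0=trein,1=metro,2=tram,3=bus), takes the minimum rank over all lines and looks the answer up in a name table.
import Mathlib
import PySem

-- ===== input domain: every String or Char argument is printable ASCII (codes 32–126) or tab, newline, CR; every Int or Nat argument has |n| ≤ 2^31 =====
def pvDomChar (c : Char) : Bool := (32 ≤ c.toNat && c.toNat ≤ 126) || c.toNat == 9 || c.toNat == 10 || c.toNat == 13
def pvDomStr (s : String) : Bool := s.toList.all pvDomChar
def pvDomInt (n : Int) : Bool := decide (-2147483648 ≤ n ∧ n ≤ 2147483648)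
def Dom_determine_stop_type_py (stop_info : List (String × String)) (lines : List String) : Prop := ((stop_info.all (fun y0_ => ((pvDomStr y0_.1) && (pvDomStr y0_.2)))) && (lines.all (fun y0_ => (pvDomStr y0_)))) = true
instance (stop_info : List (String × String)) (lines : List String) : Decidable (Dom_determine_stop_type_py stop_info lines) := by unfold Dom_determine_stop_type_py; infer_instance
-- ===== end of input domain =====

-- ===== PORT A =====
-- B classifies each line to a numeric priority rank and returns the name of the minimum rank (table lookup), instead of A's three whole-list scans plus if-cascade; alternative decomposition, same cost.
def determine_stop_type_py (stop_info : List (String × String)) (lines : List String) : String :=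
  let has_trein := lines.any (fun l => PySem.Str.isIn "Trein" l || PySem.Str.isIn "Intercity" l || PySem.Str.isIn "Sprinter" l)
  let has_metro := lines.any (fun l => PySem.Str.isIn "Metro" l)
  let has_tram := lines.any (fun l => PySem.Str.isIn "Tram" l)
  if has_trein then "trein"
  else if has_metro then "metro"
  else if has_tram then "tram"
  else "bus"

-- ===== PORT B =====
-- priority rank of a single line: 0=trein, 1=metro, 2=tram, 3=bus
def pvLineRank (l : String) : Nat :=
  if PySem.Str.isIn "Trein" l || PySem.Str.isIn "Intercity" l || PySem.Str.isIn "Sprinter" l then 0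
  else if PySem.Str.isIn "Metro" l then 1
  else if PySem.Str.isIn "Tram" l then 2
  else 3

def determine_stop_type_py_alt (stop_info : List (String × String)) (lines : List String) : String :=
  -- names[min(map(_line_rank, lines), default=3)]
  let best := PySem.List.minD (lines.map pvLineRank) (fun x => x) 3
  (["trein", "metro", "tram", "bus"].getD best "bus")

-- ===== PRECONDITION & SPEC =====
def Spec_determine_stop_type_py (stop_info : List (String × String)) (lines : List String) (out : String) : Prop := out = determine_stop_type_py_alt stop_info lines
instance (stop_info : List (String × String)) (lines : List String) (out : String) : Decidable (Spec_determine_stop_type_py stop_info lines out) := by unfold Spec_determine_stop_type_py; infer_instance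

-- ===== CLAIM =====
def Claim_equal_determine_stop_type_py : Prop := ∀ (stop_info : List (String × String)) (lines : List String), Dom_determine_stop_type_py stop_info lines → Spec_determine_stop_type_py stop_info lines (determine_stop_type_py stop_info lines)

-- ===== LEMMAS AND PROOFS =====
-- A's cascade, as a numeric rank
def pvCascade (lines : List String) : Nat :=
  if lines.any (fun l => PySem.Str.isIn "Trein" l || PySem.Str.isIn "Intercity" l || PySem.Str.isIn "Sprinter" l) then 0
  else if lines.any (fun l => PySem.Str.isIn "Metro" l) then 1
  else if lines.any (fun l => PySem.Str.isIn "Tram" l) then 2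
  else 3

theorem pvLineRank_le (l : String) : pvLineRank l ≤ 3 := by
  unfold pvLineRank; split_ifs <;> omega

theorem pvCascade_cons (h : String) (t : List String) :
    pvCascade (h :: t) = min (pvLineRank h) (pvCascade t) := by
  unfold pvCascade pvLineRank
  simp only [List.any_cons]
  by_cases h1 : (PySem.Str.isIn "Trein" h || PySem.Str.isIn "Intercity" h || PySem.Str.isIn "Sprinter" h) = true <;>
  by_cases h2 : (PySem.Str.isIn "Metro" h) = true <;>
  by_cases h3 : (PySem.Str.isIn "Tram" h) = true <;>
  by_cases a1 : (t.any fun l => PySem.Str.isIn "Trein" l || PySem.Str.isIn "Intercity" l || PySem.Str.isIn "Sprinter" l) = true <;>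
  by_cases a2 : (t.any fun l => PySem.Str.isIn "Metro" l) = true <;>
  by_cases a3 : (t.any fun l => PySem.Str.isIn "Tram" l) = true <;>
  simp only [Bool.not_eq_true] at h1 h2 h3 a1 a2 a3 <;>
  simp only [h1, h2, h3, a1, a2, a3] <;> decide

-- the running minimum of the per-line ranks computes A's cascade rank
theorem foldl_min_rank (lines : List String) (acc : Nat) (hacc : acc ≤ 3) :
    (lines.map pvLineRank).foldl min acc = min acc (pvCascade lines) := by
  induction lines generalizing acc with
  | nil =>
    simp only [List.map_nil, List.foldl_nil, pvCascade, List.any_nil]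
    simp [Nat.min_eq_left hacc]
  | cons h t ih =>
    have hr : min acc (pvLineRank h) ≤ 3 := le_trans (Nat.min_le_left _ _) hacc
    simp only [List.map_cons, List.foldl_cons]
    rw [ih _ hr, pvCascade_cons, Nat.min_assoc]

theorem determine_stop_type_py_spec : Claim_equal_determine_stop_type_py := by
  intro stop_info lines _
  unfold Spec_determine_stop_type_py determine_stop_type_py determine_stop_type_py_alt
  have hmin : PySem.List.minD (lines.map pvLineRank) (fun x => x) 3
      = (lines.map pvLineRank).foldl min 3 := by
    cases lines with
    | nil => decide
    | cons h t =>
      simp [PySem.List.minD, PySem.List.min?_id_cons,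
        Nat.min_eq_right (pvLineRank_le h)]
  rw [hmin, foldl_min_rank lines 3 (le_refl 3), Nat.min_eq_right]
  · unfold pvCascade
    by_cases h1 : (lines.any fun l => PySem.Str.isIn "Trein" l || PySem.Str.isIn "Intercity" l || PySem.Str.isIn "Sprinter" l) = true <;>
    by_cases h2 : (lines.any fun l => PySem.Str.isIn "Metro" l) = true <;>
    by_cases h3 : (lines.any fun l => PySem.Str.isIn "Tram" l) = true <;>
    simp only [h1, h2, h3, if_true, if_false, Bool.not_eq_true] at * <;>
    simp [h1, h2, h3]
  · unfold pvCascade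
    split_ifs <;> omega
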